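-- pv_equiv track=rewrite | github.com/broomsday/volumizer | pore/analysis.py | is_stoichiometry_factorable
-- ===== SOURCE A (Python) =====
-- def is_stoichiometry_factorable(stoichiometry: dict[int, int]) -> bool:
--     """
--     If all chains counts are factors of the largest chain count, return True.
--     False otherwise
--     """
--     chain_counts = sorted(list(stoichiometry.values()))
--     initial_chain_counts = len(chain_counts)
--     if 1 in chain_counts:
--         return False
--
--     factorable_counts = [chain_counts.pop()]
--     while len(chain_counts) > 0:
--         query_count = chain_counts.pop()
--         for factorable_count in factorable_counts:
--             if factorable_count % query_count == 0:
--                 factorable_counts.append(query_count)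
--                 break
--
--     if initial_chain_counts == len(factorable_counts):
--         return True
--     return False
-- ===== SOURCE B (Python) =====
-- def is_stoichiometry_factorable(stoichiometry: dict[int, int]) -> bool:
--     """
--     If all chain counts are factors of the largest chain count, return True.
--     False otherwise.  A count of 1 is rejected outright; otherwise one pass
--     tests each count for divisibility against the largest count.
--     """
--     counts = stoichiometry.values()
--     if 1 in counts:
--         return False
--     largest = max(counts)
--     return all(c == largest or largest % c == 0 for c in counts)
-- ===== Notes on version B (the rewrite author's own statement) =====
-- stated objective: faster
-- what changed: Replaces the sort plus the pop/inner-scan worklist loop by a membership test for 1 and one pass that tests each count for divisibility against the maximum.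
import Mathlib
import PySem

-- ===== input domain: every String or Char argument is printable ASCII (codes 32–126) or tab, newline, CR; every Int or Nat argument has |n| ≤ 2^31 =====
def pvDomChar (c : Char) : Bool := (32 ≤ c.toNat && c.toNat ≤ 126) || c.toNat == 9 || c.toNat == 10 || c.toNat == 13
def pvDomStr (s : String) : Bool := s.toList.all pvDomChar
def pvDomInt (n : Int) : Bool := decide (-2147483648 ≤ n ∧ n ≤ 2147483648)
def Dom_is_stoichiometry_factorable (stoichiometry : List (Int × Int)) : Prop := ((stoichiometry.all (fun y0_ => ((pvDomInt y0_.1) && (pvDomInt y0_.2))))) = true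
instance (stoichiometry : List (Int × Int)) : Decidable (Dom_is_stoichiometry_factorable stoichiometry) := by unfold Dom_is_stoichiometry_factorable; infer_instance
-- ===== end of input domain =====

-- B replaces A's sort + pop/inner-scan worklist with one divisibility pass against the max (objective: faster, asymptotic).

-- ===== PORT A =====
-- 'for factorable_count in factorable_counts: if factorable_count % query_count == 0: append; break'
def isfA_for (factorable : List Int) (fc : List Int) (q : Int) : List Int :=
  match fc with
  | [] => factorable
  | f :: rest =>
    if PySem.Int.mod f q = 0 then factorable ++ [q] else isfA_for factorable rest q

-- 'while len(chain_counts) > 0: query_count = chain_counts.pop(); for …' — the head of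
-- cc is the next popped element (cc is the remaining ascending list reversed).
def isfA_while (cc : List Int) (fc : List Int) : List Int :=
  match cc with
  | [] => fc
  | q :: rest => isfA_while rest (isfA_for fc fc q)

def is_stoichiometry_factorable (stoichiometry : List (Int × Int)) : Bool :=
  let chain_counts := PySem.List.sorted (PySem.Dict.ofList stoichiometry).values (fun x => x) false
  let initial_chain_counts := chain_counts.length
  if chain_counts.contains 1 then false
  else
    match PySem.List.pop? chain_counts with
    | none => false  -- Python raises IndexError on the empty dict; outside Pre_
    | some (top, rest) =>
      let factorable_counts := isfA_while rest.reverse [top]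
      decide (initial_chain_counts = factorable_counts.length)

-- ===== PORT B =====
def is_stoichiometry_factorable_alt (stoichiometry : List (Int × Int)) : Bool :=
  let counts := (PySem.Dict.ofList stoichiometry).values
  if counts.contains 1 then false
  else
    match PySem.List.max? counts (fun x => x) with
    | none => false  -- Python max([]) raises ValueError; outside Pre_
    | some largest =>
      counts.all (fun c => c == largest || PySem.Int.mod largest c == 0)

-- ===== PRECONDITION & SPEC =====
-- Pre_ is exactly the inputs on which Python A returns: it excludes the empty dict (A raises
-- IndexError) and dicts where a 0 count is queried by A's worklist loop (ZeroDivisionError) —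
-- a 0 alongside other counts, unless a count of 1 short-circuits A first or the 0 is the
-- single largest count (then it is never queried).
def Pre_is_stoichiometry_factorable (stoichiometry : List (Int × Int)) : Prop :=
  (PySem.Dict.ofList stoichiometry).values ≠ [] ∧
  ((0 : Int) ∈ (PySem.Dict.ofList stoichiometry).values →
    ((1 : Int) ∈ (PySem.Dict.ofList stoichiometry).values ∨
     (PySem.Dict.ofList stoichiometry).values.length = 1 ∨
     ((PySem.Dict.ofList stoichiometry).values.count 0 = 1 ∧
      ∀ v ∈ (PySem.Dict.ofList stoichiometry).values, v ≤ 0)))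
instance (stoichiometry : List (Int × Int)) : Decidable (Pre_is_stoichiometry_factorable stoichiometry) := by
  unfold Pre_is_stoichiometry_factorable; infer_instance

def pvWitness_is_stoichiometry_factorable : (List (Int × Int)) := [(1, 2), (2, 4), (3, 8)]

def Spec_is_stoichiometry_factorable (stoichiometry : List (Int × Int)) (out : Bool) : Prop := out = is_stoichiometry_factorable_alt stoichiometry
instance (stoichiometry : List (Int × Int)) (out : Bool) : Decidable (Spec_is_stoichiometry_factorable stoichiometry out) := by unfold Spec_is_stoichiometry_factorable; infer_instance

-- ===== CLAIM (what is proved, stated in full; the proofs are below) =====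
def Claim_equal_is_stoichiometry_factorable : Prop := ∀ (stoichiometry : List (Int × Int)), Dom_is_stoichiometry_factorable stoichiometry → Pre_is_stoichiometry_factorable stoichiometry → Spec_is_stoichiometry_factorable stoichiometry (is_stoichiometry_factorable stoichiometry)

-- ===== LEMMAS AND PROOFS =====

theorem isfA_for_eq (factorable fc : List Int) (q : Int) :
    isfA_for factorable fc q =
      if fc.any (fun f => decide (PySem.Int.mod f q = 0)) then factorable ++ [q] else factorable := by
  induction fc with
  | nil => simp [isfA_for]
  | cons f rest ih =>
    by_cases h : PySem.Int.mod f q = 0 <;> simp [isfA_for, h, ih]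

theorem isfA_while_eq (m : Int) (cc : List Int) (fc : List Int)
    (hm : m ∈ fc) (hinv : ∀ f ∈ fc, m = f ∨ PySem.Int.mod m f = 0) :
    isfA_while cc fc = fc ++ cc.filter (fun q => decide (m = q ∨ PySem.Int.mod m q = 0)) := by
  induction cc generalizing fc with
  | nil => simp [isfA_while]
  | cons q rest ih =>
    rw [isfA_while, isfA_for_eq]
    by_cases hq : m = q ∨ PySem.Int.mod m q = 0
    · have hany : fc.any (fun f => decide (PySem.Int.mod f q = 0)) = true := by
        refine List.any_eq_true.mpr ⟨m, hm, ?_⟩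
        simp only [decide_eq_true_eq]
        rcases hq with h | h
        · subst h; exact (PySem.Int.mod_eq_zero_iff_dvd m m).mpr dvd_rfl
        · exact h
      rw [hany]
      simp only [if_true]
      have hinv' : ∀ f ∈ fc ++ [q], m = f ∨ PySem.Int.mod m f = 0 := by
        intro f hf
        rcases List.mem_append.mp hf with h | h
        · exact hinv f h
        · simp at h; subst h; exact hq
      rw [ih (fc ++ [q]) (List.mem_append.mpr (Or.inl hm)) hinv']
      simp [hq]
    · have hany : fc.any (fun f => decide (PySem.Int.mod f q = 0)) = false := by
        refine List.any_eq_false.mpr ?_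
        intro f hf
        simp only [decide_eq_true_eq]
        intro hmod
        apply hq
        have hq_dvd_f : q ∣ f := (PySem.Int.mod_eq_zero_iff_dvd f q).mp hmod
        rcases hinv f hf with h | h
        · subst h; right; exact (PySem.Int.mod_eq_zero_iff_dvd m q).mpr hq_dvd_f
        · have hf_dvd_m : f ∣ m := (PySem.Int.mod_eq_zero_iff_dvd m f).mp h
          right; exact (PySem.Int.mod_eq_zero_iff_dvd m q).mpr (hq_dvd_f.trans hf_dvd_m)
      rw [hany]
      simp only [Bool.false_eq_true, if_false]
      rw [ih fc hm hinv]
      simp [hq]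

-- ===== VERDICT (by name: the statement is the Claim_ definition above) =====
theorem is_stoichiometry_factorable_spec : Claim_equal_is_stoichiometry_factorable := by
  intro st _hdom hpre
  unfold Spec_is_stoichiometry_factorable
  obtain ⟨hne, -⟩ := hpre
  set counts := (PySem.Dict.ofList st).values with hcounts
  obtain ⟨m, hm⟩ : ∃ m, PySem.List.max? counts (fun x => x) = some m := by
    cases hmx : PySem.List.max? counts (fun x => x) with
    | none => exact absurd ((PySem.List.max?_eq_none_iff counts _).mp hmx) hne
    | some m => exact ⟨m, rfl⟩
  have hm_mem : m ∈ counts := PySem.List.max?_mem hm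
  have hm_max : ∀ y ∈ counts, y ≤ m := PySem.List.max?_isMax hm
  by_cases h1 : (1 : Int) ∈ counts
  · have hA : is_stoichiometry_factorable st = false := by
      unfold is_stoichiometry_factorable
      simp [← hcounts, PySem.List.mem_sorted, h1]
    have hB : is_stoichiometry_factorable_alt st = false := by
      unfold is_stoichiometry_factorable_alt
      simp [← hcounts, h1]
    rw [hA, hB]
  · have hsne : PySem.List.sorted counts (fun x => x) false ≠ [] := by
      simpa [PySem.List.sorted_eq_nil_iff] using hne
    obtain ⟨ys, y, hsy⟩ := (List.eq_nil_or_concat _).resolve_left hsne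
    rw [List.concat_eq_append] at hsy
    have hy_mem : y ∈ counts := by
      rw [← PySem.List.mem_sorted (key := fun x => x) (rev := false), hsy]
      simp
    have hpw := PySem.List.sorted_pairwise counts (fun x => x)
    rw [hsy] at hpw
    have hys_le : ∀ a ∈ ys, a ≤ y := by
      intro a ha
      exact (List.pairwise_append.mp hpw).2.2 a ha y (by simp)
    have hym : m = y := by
      have hm_in : m ∈ ys ++ [y] := by
        rw [← hsy, PySem.List.mem_sorted]
        exact hm_mem
      rcases List.mem_append.mp hm_in with h | h
      · exact le_antisymm (hys_le m h) (hm_max y hy_mem)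
      · simp at h; omega
    subst hym
    have hcont : (PySem.List.sorted counts (fun x => x) false).contains 1 = false := by
      simp [PySem.List.mem_sorted, h1]
    have hpop : PySem.List.pop? (PySem.List.sorted counts (fun x => x) false) = some (m, ys) := by
      rw [hsy]; exact PySem.List.pop?_last ys m
    have hA : is_stoichiometry_factorable st =
        decide (∀ q ∈ ys, m = q ∨ PySem.Int.mod m q = 0) := by
      unfold is_stoichiometry_factorable
      simp only [← hcounts, hcont, Bool.false_eq_true, if_false, hpop]
      rw [isfA_while_eq m ys.reverse [m] (by simp)
        (by intro f hf; simp at hf; subst hf; left; rfl)]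
      rw [decide_eq_decide]
      rw [hsy]
      simp only [List.length_append, List.length_cons, List.length_nil, List.singleton_append,
        List.length_cons]
      constructor
      · intro hlen q hq
        have hEq : (ys.reverse.filter (fun q => decide (m = q ∨ PySem.Int.mod m q = 0))).length
            = ys.reverse.length := by
          rw [List.length_reverse]; omega
        have := List.length_filter_eq_length_iff.mp hEq q (List.mem_reverse.mpr hq)
        simpa using this
      · intro hall
        have hEq : (ys.reverse.filter (fun q => decide (m = q ∨ PySem.Int.mod m q = 0))).length
            = ys.reverse.length :=
          List.length_filter_eq_length_iff.mpr
            (by intro a ha; simpa using hall a (List.mem_reverse.mp ha))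
        rw [List.length_reverse] at hEq
        omega
    have hB : is_stoichiometry_factorable_alt st =
        decide (∀ q ∈ ys, m = q ∨ PySem.Int.mod m q = 0) := by
      unfold is_stoichiometry_factorable_alt
      have hct : counts.contains 1 = false := by simp [h1]
      simp only [← hcounts, hct, Bool.false_eq_true, if_false, hm]
      by_cases hall : ∀ q ∈ ys, m = q ∨ PySem.Int.mod m q = 0
      · rw [decide_eq_true hall]
        refine List.all_eq_true.mpr ?_
        intro c hc
        have hc' : c ∈ ys ++ [m] := by
          rw [← hsy, PySem.List.mem_sorted]
          exact hc
        have hPc : c = m ∨ PySem.Int.mod m c = 0 := by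
          rcases List.mem_append.mp hc' with h | h
          · rcases hall c h with h' | h'
            · exact Or.inl h'.symm
            · exact Or.inr h'
          · simp at h; exact Or.inl h
        rcases hPc with h | h
        · subst h; simp
        · simp [h]
      · push Not at hall
        obtain ⟨q, hq, hnq⟩ := hall
        have hq_counts : q ∈ counts := by
          rw [← PySem.List.mem_sorted (key := fun x => x) (rev := false), hsy]
          exact List.mem_append.mpr (Or.inl hq)
        have hqm : q ≠ m := fun h => hnq.1 h.symm
        simp only [eq_false (show ¬ ∀ q ∈ ys, m = q ∨ PySem.Int.mod m q = 0 from by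
          push Not; exact ⟨q, hq, hnq⟩), decide_false]
        refine List.all_eq_false.mpr ⟨q, hq_counts, ?_⟩
        simp [hqm, hnq.2]
    rw [hA, hB]
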